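-- pv_equiv track=rewrite | github.com/julianknutsen/packs | discord/scripts/discord_gateway_service.py | casefold_lookup
-- ===== SOURCE A (Python) =====
-- def casefold_lookup(values: list[str]) -> tuple[dict[str, str], set[str]]:
--     lookup: dict[str, str] = {}
--     collisions: set[str] = set()
--     for value in values:
--         normalized = str(value).strip()
--         if not normalized:
--             continue
--         key = normalized.casefold()
--         existing = lookup.get(key)
--         if existing and existing != normalized:
--             collisions.add(key)
--             continue
--         lookup[key] = normalized
--     return lookup, collisions
-- ===== SOURCE B (Python) =====
-- def casefold_lookup(values: list[str]) -> tuple[dict[str, str], set[str]]: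
--     norms = [(v.strip().casefold(), v.strip()) for v in values if v.strip()]
--     lookup: dict[str, str] = {}
--     for key, norm in norms:
--         lookup.setdefault(key, norm)
--     collisions = {key for key, norm in norms if norm != lookup[key]}
--     return lookup, collisions
-- ===== Notes on version B (the rewrite author's own statement) =====
-- stated objective: simpler
-- what changed: B first extracts all non-empty (casefold-key, stripped-value) pairs in one comprehension, builds the lookup with setdefault (first occurrence wins), and derives collisions in a separate pass comparing each pair against the finished index, instead of A's single loop with interleaved get/insert/collision branching and continue statements.
import Mathlib
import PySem

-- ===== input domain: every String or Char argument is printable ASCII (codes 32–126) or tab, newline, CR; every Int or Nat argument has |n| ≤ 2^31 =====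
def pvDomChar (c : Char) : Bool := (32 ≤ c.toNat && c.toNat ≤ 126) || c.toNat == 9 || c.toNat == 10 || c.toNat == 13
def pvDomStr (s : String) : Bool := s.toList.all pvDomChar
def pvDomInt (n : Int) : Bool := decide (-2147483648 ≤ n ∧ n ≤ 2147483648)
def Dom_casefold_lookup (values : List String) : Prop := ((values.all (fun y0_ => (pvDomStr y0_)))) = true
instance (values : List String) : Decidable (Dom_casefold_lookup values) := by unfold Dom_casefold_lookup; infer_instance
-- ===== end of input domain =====

-- B builds the first-occurrence index in one pass and derives collisions in a second
-- shaped pass, instead of A's interleaved inline get/insert/collision logic (objective: simpler).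
-- str.casefold() is ported as PySem.Str.lower, exact on the ASCII domain Dom_casefold_lookup.

-- ===== PORT A =====
-- loop body of A's for-loop, transcribed step for step
def casefoldStepA (st : PySem.Dict String String × PySem.Set String) (value : String) :
    PySem.Dict String String × PySem.Set String :=
  let normalized := PySem.Str.strip value
  if normalized = "" then st
  else
    let key := PySem.Str.lower normalized
    match st.1.get? key with
    | some existing =>
        if existing ≠ "" ∧ existing ≠ normalized then (st.1, st.2.add key)
        else (st.1.insert key normalized, st.2)
    | none => (st.1.insert key normalized, st.2)

def casefold_lookup (values : List String) : (List (String × String)) × List String :=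
  let st := values.foldl casefoldStepA (PySem.Dict.empty, PySem.Set.empty)
  (st.1.items, st.2)

-- ===== PORT B =====
-- norms = [(v.strip().casefold(), v.strip()) for v in values if v.strip()]
def normPairs (values : List String) : List (String × String) :=
  values.filterMap (fun v =>
    if PySem.Str.strip v = "" then none
    else some (PySem.Str.lower (PySem.Str.strip v), PySem.Str.strip v))

def casefold_lookup_alt (values : List String) : (List (String × String)) × List String :=
  let norms := normPairs values
  let lookup := norms.foldl (fun d p => d.setdefault p.1 p.2) PySem.Dict.empty
  -- lookup[key] never misses (every key of norms is in lookup): getD with "" is exact here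
  let collisions := PySem.Set.ofList
    (norms.filterMap (fun p => if p.2 ≠ lookup.getD p.1 "" then some p.1 else none))
  (lookup.items, collisions)

-- ===== PRECONDITION & SPEC =====
def Spec_casefold_lookup (values : List String) (out : (List (String × String)) × List String) : Prop := out = casefold_lookup_alt values
instance (values : List String) (out : (List (String × String)) × List String) : Decidable (Spec_casefold_lookup values out) := by unfold Spec_casefold_lookup; infer_instance

-- ===== CLAIM (what is proved, stated in full; the proofs are below) =====
def Claim_equal_casefold_lookup : Prop := ∀ (values : List String), Dom_casefold_lookup values → Spec_casefold_lookup values (casefold_lookup values)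

-- ===== LEMMAS AND PROOFS =====

-- A's loop, re-expressed over the normalized (key, norm) pairs
def pairStep (st : PySem.Dict String String × PySem.Set String) (p : String × String) :
    PySem.Dict String String × PySem.Set String :=
  match st.1.get? p.1 with
  | some existing =>
      if existing ≠ "" ∧ existing ≠ p.2 then (st.1, st.2.add p.1)
      else (st.1.insert p.1 p.2, st.2)
  | none => (st.1.insert p.1 p.2, st.2)

-- collision events produced while scanning, relative to the index built so far
def evts (d : PySem.Dict String String) : List (String × String) → List String
  | [] => []
  | p :: rest =>
    match d.get? p.1 with
    | none => evts (d.insert p.1 p.2) rest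
    | some e => if e ≠ p.2 then p.1 :: evts d rest else evts d rest

def sdFold (d : PySem.Dict String String) (ns : List (String × String)) : PySem.Dict String String :=
  ns.foldl (fun d p => d.setdefault p.1 p.2) d

theorem foldA_eq_pairs (values : List String)
    (st : PySem.Dict String String × PySem.Set String) :
    values.foldl casefoldStepA st = (normPairs values).foldl pairStep st := by
  induction values generalizing st with
  | nil => rfl
  | cons v vs ih =>
    by_cases h : PySem.Str.strip v = ""
    · rw [show normPairs (v :: vs) = normPairs vs by simp [normPairs, h]]
      rw [show (v :: vs).foldl casefoldStepA st = vs.foldl casefoldStepA st by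
        simp [List.foldl, casefoldStepA, h]]
      exact ih st
    · rw [show normPairs (v :: vs)
          = (PySem.Str.lower (PySem.Str.strip v), PySem.Str.strip v) :: normPairs vs by
        simp [normPairs, h]]
      rw [List.foldl_cons, List.foldl_cons]
      rw [show casefoldStepA st v
          = pairStep st (PySem.Str.lower (PySem.Str.strip v), PySem.Str.strip v) by
        simp [casefoldStepA, pairStep, h]]
      exact ih _

theorem insert_eq_self (d : PySem.Dict String String) (k v : String)
    (hnd : d.keys.Nodup) (h : d.get? k = some v) : d.insert k v = d := by
  apply PySem.Dict.ext
  have hc : d.contains k = true := by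
    rw [PySem.Dict.contains_eq_isSome_get?, h]; rfl
  rw [PySem.Dict.items_insert_of_contains d v hc]
  conv_rhs => rw [← List.map_id d.items]
  apply List.map_congr_left
  rintro ⟨pk, pv⟩ hp
  by_cases hpk : pk = k
  · subst hpk
    have hv : d.get? pk = some pv := PySem.Dict.get?_of_mem_items d hp hnd
    rw [h] at hv
    injection hv with hv
    simp [hv]
  · simp [hpk]

theorem get?_sdFold_of_some (ns : List (String × String))
    (d : PySem.Dict String String) (k v : String) (h : d.get? k = some v) :
    (sdFold d ns).get? k = some v := by
  induction ns generalizing d with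
  | nil => exact h
  | cons p rest ih =>
    simp only [sdFold, List.foldl]
    apply ih
    by_cases hk : k = p.1
    · subst hk
      rw [PySem.Dict.get?_setdefault_self, h]
      rfl
    · rw [PySem.Dict.get?_setdefault_of_ne d p.2 hk]
      exact h

theorem nodup_keys_sdFold (ns : List (String × String))
    (d : PySem.Dict String String) (hnd : d.keys.Nodup) : (sdFold d ns).keys.Nodup := by
  induction ns generalizing d with
  | nil => exact hnd
  | cons p rest ih =>
    simp only [sdFold, List.foldl]
    apply ih
    by_cases hc : d.contains p.1
    · rw [PySem.Dict.setdefault_of_contains d p.2 hc]; exact hnd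
    · rw [PySem.Dict.setdefault_of_not_contains d p.2 (by simpa using hc)]
      exact PySem.Dict.nodup_keys_insert d p.1 p.2 hnd

theorem getD_sdFold_of_some (ns : List (String × String))
    (d : PySem.Dict String String) (k v : String)
    (hnd : d.keys.Nodup) (h : d.get? k = some v) :
    (sdFold d ns).getD k "" = v := by
  have h1 := get?_sdFold_of_some ns d k v h
  exact PySem.Dict.getD_of_mem_items _ (PySem.Dict.mem_items_of_get?_eq_some _ h1)
    (nodup_keys_sdFold ns d hnd) ""

-- the events produced while scanning coincide with comparing against the final index
theorem evts_eq_filterMap (ns : List (String × String)) (d : PySem.Dict String String)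
    (hnd : d.keys.Nodup) :
    evts d ns = ns.filterMap
      (fun p => if p.2 ≠ (sdFold d ns).getD p.1 "" then some p.1 else none) := by
  induction ns generalizing d with
  | nil => rfl
  | cons p rest ih =>
    rw [List.filterMap_cons]
    cases hget : d.get? p.1 with
    | none =>
      have hc : d.contains p.1 = false := by
        rw [PySem.Dict.contains_eq_isSome_get?, hget]; rfl
      have hnd' := PySem.Dict.nodup_keys_insert d p.1 p.2 hnd
      have hsd : sdFold d (p :: rest) = sdFold (d.insert p.1 p.2) rest := by
        simp [sdFold, PySem.Dict.setdefault_of_not_contains d p.2 hc]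
      have hfin : (sdFold (d.insert p.1 p.2) rest).getD p.1 "" = p.2 :=
        getD_sdFold_of_some rest _ _ _ hnd' (PySem.Dict.get?_insert_self d p.1 p.2)
      simp only [hsd, hfin]
      rw [if_neg (fun hh => hh rfl)]
      show evts d (p :: rest) = _
      simp only [evts, hget]
      exact ih _ hnd'
    | some e =>
      have hc : d.contains p.1 = true := by
        rw [PySem.Dict.contains_eq_isSome_get?, hget]; rfl
      have hsd : sdFold d (p :: rest) = sdFold d rest := by
        simp [sdFold, PySem.Dict.setdefault_of_contains d p.2 hc]
      have hfin : (sdFold d rest).getD p.1 "" = e :=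
        getD_sdFold_of_some rest d _ _ hnd hget
      simp only [hsd, hfin]
      show evts d (p :: rest) = _
      simp only [evts, hget]
      by_cases hne : e = p.2
      · subst hne
        rw [if_neg (fun hh => hh rfl), if_neg (fun hh => hh rfl)]
        exact ih d hnd
      · rw [if_pos (show e ≠ p.2 from hne), if_pos (show p.2 ≠ e from fun hh => hne hh.symm)]
        show p.1 :: evts d rest = p.1 :: _
        rw [ih d hnd]

-- main invariant: A's pair loop = setdefault index + event list
theorem pairs_fold_eq (ns : List (String × String))
    (d : PySem.Dict String String) (c : PySem.Set String)
    (hnd : d.keys.Nodup)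
    (hval : ∀ k e, d.get? k = some e → e ≠ "")
    (hns : ∀ p ∈ ns, p.2 ≠ "") :
    ns.foldl pairStep (d, c) = (sdFold d ns, (evts d ns).foldl PySem.Set.add c) := by
  induction ns generalizing d c with
  | nil => rfl
  | cons p rest ih =>
    have hp2 : p.2 ≠ "" := hns p (List.mem_cons_self ..)
    have hrest : ∀ q ∈ rest, q.2 ≠ "" := fun q hq => hns q (List.mem_cons_of_mem _ hq)
    rw [List.foldl_cons]
    cases hget : d.get? p.1 with
    | none =>
      have hc : d.contains p.1 = false := by
        rw [PySem.Dict.contains_eq_isSome_get?, hget]; rfl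
      have hstep : pairStep (d, c) p = (d.insert p.1 p.2, c) := by
        simp [pairStep, hget]
      have hsd : sdFold d (p :: rest) = sdFold (d.insert p.1 p.2) rest := by
        simp [sdFold, PySem.Dict.setdefault_of_not_contains d p.2 hc]
      have hev : evts d (p :: rest) = evts (d.insert p.1 p.2) rest := by
        simp only [evts, hget]
      rw [hstep, hsd, hev]
      have hval' : ∀ k e, (d.insert p.1 p.2).get? k = some e → e ≠ "" := by
        intro k e he
        by_cases hk : k = p.1
        · subst hk
          rw [PySem.Dict.get?_insert_self] at he
          injection he with he
          subst he
          exact hp2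
        · rw [PySem.Dict.get?_insert_of_ne d p.2 hk] at he
          exact hval k e he
      exact ih _ c (PySem.Dict.nodup_keys_insert d p.1 p.2 hnd) hval' hrest
    | some e =>
      have he : e ≠ "" := hval p.1 e hget
      by_cases hne : e = p.2
      · subst hne
        have hstep : pairStep (d, c) p = (d.insert p.1 p.2, c) := by
          simp [pairStep, hget]
        have hsd : sdFold d (p :: rest) = sdFold d rest := by
          have hc : d.contains p.1 = true := by
            rw [PySem.Dict.contains_eq_isSome_get?, hget]; rfl
          simp [sdFold, PySem.Dict.setdefault_of_contains d p.2 hc]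
        have hev : evts d (p :: rest) = evts d rest := by
          simp only [evts, hget]
          rw [if_neg (fun hh => hh rfl)]
        rw [hstep, hsd, hev, insert_eq_self d p.1 p.2 hnd hget]
        exact ih d c hnd hval hrest
      · have hstep : pairStep (d, c) p = (d, c.add p.1) := by
          simp [pairStep, hget, he, hne]
        have hsd : sdFold d (p :: rest) = sdFold d rest := by
          have hc : d.contains p.1 = true := by
            rw [PySem.Dict.contains_eq_isSome_get?, hget]; rfl
          simp [sdFold, PySem.Dict.setdefault_of_contains d p.2 hc]
        have hev : evts d (p :: rest) = p.1 :: evts d rest := by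
          simp only [evts, hget]
          rw [if_pos hne]
        rw [hstep, hsd, hev, List.foldl_cons]
        exact ih d _ hnd hval hrest

theorem normPairs_snd_ne (values : List String) :
    ∀ p ∈ normPairs values, p.2 ≠ "" := by
  intro p hp
  simp only [normPairs, List.mem_filterMap] at hp
  obtain ⟨v, _, hv⟩ := hp
  by_cases h : PySem.Str.strip v = ""
  · simp [h] at hv
  · simp only [if_neg h, Option.some.injEq] at hv
    rw [← hv]
    exact h

-- ===== VERDICT (by name: the statement is the Claim_ definition above) =====
theorem casefold_lookup_spec : Claim_equal_casefold_lookup := by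
  intro values _
  unfold Spec_casefold_lookup casefold_lookup casefold_lookup_alt
  dsimp only
  rw [foldA_eq_pairs]
  rw [pairs_fold_eq (normPairs values) PySem.Dict.empty PySem.Set.empty
    (by simp [PySem.Dict.keys_empty])
    (by intro k e he; rw [PySem.Dict.get?_empty] at he; exact absurd he (by simp))
    (normPairs_snd_ne values)]
  rw [evts_eq_filterMap (normPairs values) PySem.Dict.empty (by simp [PySem.Dict.keys_empty])]
  rw [PySem.Set.ofList_eq_foldl]
  rfl
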